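-- pv_equiv track=rewrite | github.com/VigneshPonnam/Phishing-Sites-Detection | main.py | longest_host
-- ===== SOURCE A (Python) =====
-- def longest_host(host):
--     words = str(host).split(".")
--     m = 0
--     for e in words:
--         if len(e) == 0:
--             continue
--         elif m < len(e):
--             m = len(e)
--     return m
-- ===== SOURCE B (Python) =====
-- def longest_host(host):
--     # single character scan: track current non-dot run, no intermediate list
--     m = 0
--     cur = 0
--     for c in str(host):
--         if c == ".":
--             cur = 0
--         else:
--             cur = cur + 1
--         m = max(m, cur)
--     return m
-- ===== Notes on version B (the rewrite author's own statement) =====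
-- stated objective: alternative
-- what changed: Replaces the build-a-word-list-then-loop strategy (splitting on dots) by a single character-level scan that keeps the current non-dot run length and a running maximum, with no intermediate list.
import Mathlib
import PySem

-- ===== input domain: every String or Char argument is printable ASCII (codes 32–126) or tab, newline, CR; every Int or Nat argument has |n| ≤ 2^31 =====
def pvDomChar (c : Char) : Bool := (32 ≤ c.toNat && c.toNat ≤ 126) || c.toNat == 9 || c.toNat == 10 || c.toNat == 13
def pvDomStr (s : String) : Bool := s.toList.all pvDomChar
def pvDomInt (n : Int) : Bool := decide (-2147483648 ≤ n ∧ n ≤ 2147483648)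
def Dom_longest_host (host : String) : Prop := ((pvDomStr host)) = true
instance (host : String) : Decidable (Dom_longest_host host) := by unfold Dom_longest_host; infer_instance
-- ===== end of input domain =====

-- B replaces dot-split-then-loop by a single character scan with a running run counter; same cost, no intermediate list.

-- ===== PORT A =====
def longest_host (host : String) : Int :=
  let words := PySem.Chars.splitOn host.toList ['.']
  words.foldl (fun m e =>
    if e.length = 0 then m
    else if m < (e.length : Int) then (e.length : Int)
    else m) 0

-- ===== PORT B =====
def longest_host_alt (host : String) : Int :=
  (host.toList.foldl (fun (p : Int × Int) c =>
    let cur := if c = '.' then 0 else p.2 + 1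
    (max p.1 cur, cur)) (0, 0)).1

-- ===== PRECONDITION & SPEC =====
def Spec_longest_host (host : String) (out : Int) : Prop := out = longest_host_alt host
instance (host : String) (out : Int) : Decidable (Spec_longest_host host out) := by unfold Spec_longest_host; infer_instance

-- ===== CLAIM (what is proved, stated in full; the proofs are below) =====
def Claim_equal_longest_host : Prop := ∀ (host : String), Dom_longest_host host → Spec_longest_host host (longest_host host)

-- ===== LEMMAS AND PROOFS =====

-- cons-recursive characterisation of splitting on a single character
def splitRec (d : Char) : List Char → List (List Char)
  | [] => [[]]
  | c :: rest => if c = d then [] :: splitRec d rest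
                 else (splitRec d rest).modifyHead (c :: ·)

theorem splitRec_ne_nil (d : Char) (cs : List Char) : splitRec d cs ≠ [] := by
  cases cs with
  | nil => simp [splitRec]
  | cons c rest =>
    simp only [splitRec]
    split_ifs
    · simp
    · cases h : splitRec d rest with
      | nil => exact absurd h (splitRec_ne_nil d rest)
      | cons a t => simp

theorem splitOn_go_eq (d : Char) (fuel : Nat) (l cur : List Char) (acc : List (List Char))
    (h : l.length < fuel) :
    PySem.Chars.splitOn.go [d] fuel l cur acc
      = acc.reverse ++ (splitRec d l).modifyHead (cur.reverse ++ ·) := by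
  induction fuel generalizing l cur acc with
  | zero => omega
  | succ fuel ih =>
    cases l with
    | nil =>
      rw [PySem.Chars.splitOn.go.eq_def]
      simp [splitRec]
    | cons c rest =>
      rw [PySem.Chars.splitOn.go.eq_def]
      simp only []
      by_cases hc : c = d
      · have hp : [d].isPrefixOf (c :: rest) = true := by simp [List.isPrefixOf, hc]
        rw [if_pos hp]
        simp only [List.length_cons] at h
        rw [List.length_singleton, List.drop_one, List.tail_cons,
            ih rest [] (cur.reverse :: acc) (by omega)]
        simp only [splitRec, if_pos hc, List.reverse_cons, List.append_assoc,
          List.reverse_nil, List.modifyHead_cons, List.nil_append,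
          List.cons_append]
        cases hs : splitRec d rest <;> simp [List.modifyHead]
      · have hp : [d].isPrefixOf (c :: rest) = false := by
          simp [List.isPrefixOf]; exact fun h' => absurd h'.symm hc
        rw [if_neg (by simp [hp])]
        simp only [List.length_cons] at h
        rw [ih rest (c :: cur) acc (by omega)]
        simp only [splitRec, if_neg hc]
        cases hs : splitRec d rest with
        | nil => exact absurd hs (splitRec_ne_nil d rest)
        | cons a t => simp

theorem splitOn_eq_splitRec (d : Char) (cs : List Char) :
    PySem.Chars.splitOn cs [d] = splitRec d cs := by
  unfold PySem.Chars.splitOn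
  rw [splitOn_go_eq d (cs.length + 1) cs [] [] (by omega)]
  cases h : splitRec d cs with
  | nil => exact absurd h (splitRec_ne_nil d cs)
  | cons a t => simp

-- A's step is max with the segment length, for nonnegative accumulator
theorem foldA_eq_foldmax (l : List (List Char)) (m : Int) (hm : 0 ≤ m) :
    l.foldl (fun m e =>
      if e.length = 0 then m
      else if m < (e.length : Int) then (e.length : Int)
      else m) m
    = l.foldl (fun m e => max m (e.length : Int)) m := by
  induction l generalizing m with
  | nil => rfl
  | cons e t ih =>
    simp only [List.foldl_cons]
    have hstep : (if e.length = 0 then m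
        else if m < (e.length : Int) then (e.length : Int) else m)
        = max m (e.length : Int) := by
      split_ifs with h1 h2 <;> omega
    rw [hstep, ih _ (le_trans hm (le_max_left _ _))]

theorem le_foldl_max (l : List (List Char)) (m : Int) :
    m ≤ l.foldl (fun m e => max m (e.length : Int)) m := by
  induction l generalizing m with
  | nil => simp
  | cons e t ih => exact le_trans (le_max_left _ _) (ih _)

-- normalize the fold base: fold from x ≥ 0 is max x (fold from 0)
theorem foldl_max_base (t : List (List Char)) (x : Int) (hx : 0 ≤ x) :
    t.foldl (fun a e => max a (e.length : Int)) x
      = max x (t.foldl (fun a e => max a (e.length : Int)) 0) := by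
  induction t generalizing x with
  | nil => simp; omega
  | cons e s ih =>
    simp only [List.foldl_cons]
    have hle : (0:Int) ≤ e.length := Int.natCast_nonneg _
    rw [ih (max x (e.length : Int)) (by omega), ih (max 0 (e.length : Int)) (by omega)]
    omega

-- the key invariant: B's scan computes the max over splitRec's segment lengths,
-- with the current partial run cur prefixed to the first segment
theorem scan_eq_segMax (cs : List Char) (m cur : Int)
    (h0 : 0 ≤ cur) (hcm : cur ≤ m) :
    (cs.foldl (fun (p : Int × Int) c =>
      let cur := if c = '.' then 0 else p.2 + 1
      (max p.1 cur, cur)) (m, cur)).1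
    = max m (match splitRec '.' cs with
        | h :: t => t.foldl (fun a e => max a (e.length : Int)) (cur + h.length)
        | [] => cur) := by
  induction cs generalizing m cur with
  | nil => simp [splitRec]; omega
  | cons c rest ih =>
    simp only [List.foldl_cons]
    by_cases hc : c = '.'
    · simp only [if_pos hc]
      rw [show max m 0 = m by omega, ih m 0 le_rfl (by omega)]
      simp only [splitRec, if_pos hc]
      cases hs : splitRec '.' rest with
      | nil => exact absurd hs (splitRec_ne_nil '.' rest)
      | cons a t =>
        simp only [List.foldl_cons, List.length_nil, Int.natCast_zero, add_zero, zero_add]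
        have hF := le_foldl_max t (0 : Int)
        have hla : (0:Int) ≤ a.length := Int.natCast_nonneg _
        rw [foldl_max_base t (a.length : Int) hla,
            foldl_max_base t (max cur (a.length : Int)) (by omega)]
        omega
    · simp only [if_neg hc]
      rw [ih (max m (cur + 1)) (cur + 1) (by omega) (le_max_right _ _)]
      simp only [splitRec, if_neg hc]
      cases hs : splitRec '.' rest with
      | nil => exact absurd hs (splitRec_ne_nil '.' rest)
      | cons a t =>
        simp only [List.modifyHead, List.length_cons]
        have hF := le_foldl_max t (0 : Int)
        have hla : (0:Int) ≤ a.length := Int.natCast_nonneg _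
        push_cast
        rw [foldl_max_base t (cur + 1 + (a.length : Int)) (by omega),
            foldl_max_base t (cur + ((a.length : Int) + 1)) (by omega)]
        omega

-- ===== VERDICT (by name: the statement is the Claim_ definition above) =====
theorem longest_host_spec : Claim_equal_longest_host := by
  intro host _
  unfold Spec_longest_host longest_host longest_host_alt
  rw [splitOn_eq_splitRec, scan_eq_segMax host.toList 0 0 le_rfl le_rfl]
  rw [foldA_eq_foldmax _ 0 le_rfl]
  cases hs : splitRec '.' host.toList with
  | nil => exact absurd hs (splitRec_ne_nil '.' host.toList)
  | cons a t =>
    simp only [List.foldl_cons, zero_add]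
    have hF := le_foldl_max t (0 : Int)
    have hla : (0:Int) ≤ a.length := Int.natCast_nonneg _
    rw [foldl_max_base t (max 0 (a.length : Int)) (by omega),
        foldl_max_base t ((a.length : Int)) hla]
    omega
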